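-- pv_equiv track=rewrite | github.com/zapabob/clawdbot | scripts/evolution/conflict_resolver/initial.py | resolve_content
-- ===== SOURCE A (Python) =====
-- CONFLICT_START = "<<<<<<< "
--
-- CONFLICT_SEP = "======="
--
-- CONFLICT_END = ">>>>>>> "
--
-- def parse_conflict_blocks(content: str) -> list[dict]:
--     """Parse conflict markers into structured blocks"""
--     blocks = []
--     lines = content.splitlines(keepends=True)
--     i = 0
--     while i < len(lines):
--         if lines[i].startswith(CONFLICT_START):
--             ours_lines = []
--             theirs_lines = []
--             in_ours = True
--             i += 1
--             while i < len(lines):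
--                 if lines[i].startswith(CONFLICT_SEP) and not lines[i].startswith(
--                     CONFLICT_SEP + " "
--                 ):
--                     in_ours = False
--                     i += 1
--                     continue
--                 if lines[i].startswith(CONFLICT_END):
--                     blocks.append({"ours": ours_lines, "theirs": theirs_lines})
--                     i += 1
--                     break
--                 if in_ours:
--                     ours_lines.append(lines[i])
--                 else:
--                     theirs_lines.append(lines[i])
--                 i += 1
--         else:
--             blocks.append({"plain": lines[i]})
--             i += 1
--     return blocks
--
-- def resolve_content(content: str, strategy: str, filepath: str) -> str:
--     """Apply resolution strategy to file content"""
--     blocks = parse_conflict_blocks(content)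
--     result = []
--
--     for block in blocks:
--         if "plain" in block:
--             result.append(block["plain"])
--         else:
--             ours = block["ours"]
--             theirs = block["theirs"]
--
--             if strategy == "ours":
--                 result.extend(ours)
--             elif strategy == "theirs":
--                 result.extend(theirs)
--             else:  # merge strategy
--                 # For command-registry.ts: accept theirs, then inject our evo block if missing
--                 result.extend(theirs)
--                 # Inject evo registration if theirs lacks it
--                 theirs_joined = "".join(theirs)
--                 ours_joined = "".join(ours)
--                 if (
--                     "registerEvoCommands" in ours_joined
--                     and "registerEvoCommands" not in theirs_joined
--                 ):
--                     result.extend(ours)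
--
--     resolved = "".join(result)
--
--     # Post-processing for command-registry.ts:
--     if "command-registry.ts" in filepath:
--         resolved = _ensure_evo_in_registry(resolved)
--
--     return resolved
--
-- def _ensure_evo_in_registry(content: str) -> str:
--     """Ensure evo CLI import and registration survive in command-registry.ts"""
--     evo_import = 'import { registerEvoCommands } from "../evo-cli.js";'
--     evo_register = """  {
--     id: "evo",
--     register: ({ program }) => registerEvoCommands(program),
--   },"""
--
--     if "registerEvoCommands" not in content:
--         lines = content.splitlines(keepends=True)
--         last_import_idx = 0
--         for idx, line in enumerate(lines):
--             if line.startswith("import "):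
--                 last_import_idx = idx
--         lines.insert(last_import_idx + 1, evo_import + "\n")
--         content = "".join(lines)
--
--     if '"evo"' not in content and 'id: "evo"' not in content:
--         content = content.replace(
--             '  {\n    id: "setup"',
--             evo_register + '\n  {\n    id: "setup"',
--         )
--
--     return content
-- ===== SOURCE B (Python) =====
-- # B: single streaming pass with a mode flag and two buffers instead of A's
-- # build-blocks-then-iterate two-phase structure; identical post-processing.
-- CONFLICT_START = "<<<<<<< "
-- CONFLICT_SEP = "======="
-- CONFLICT_END = ">>>>>>> "
--
--
-- def _ensure_evo_in_registry(content: str) -> str: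
--     """Ensure evo CLI import and registration survive in command-registry.ts"""
--     evo_import = 'import { registerEvoCommands } from "../evo-cli.js";'
--     evo_register = """  {
--     id: "evo",
--     register: ({ program }) => registerEvoCommands(program),
--   },"""
--
--     if "registerEvoCommands" not in content:
--         lines = content.splitlines(keepends=True)
--         last_import_idx = 0
--         for idx, line in enumerate(lines):
--             if line.startswith("import "):
--                 last_import_idx = idx
--         lines.insert(last_import_idx + 1, evo_import + "\n")
--         content = "".join(lines)
--
--     if '"evo"' not in content and 'id: "evo"' not in content:
--         content = content.replace(
--             '  {\n    id: "setup"',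
--             evo_register + '\n  {\n    id: "setup"',
--         )
--
--     return content
--
--
-- def resolve_content(content: str, strategy: str, filepath: str) -> str:
--     """Apply resolution strategy to file content (one streaming pass)"""
--     result = []
--     mode = 0  # 0 = plain, 1 = inside ours, 2 = inside theirs
--     ours = []
--     theirs = []
--     for line in content.splitlines(keepends=True):
--         if mode == 0:
--             if line.startswith(CONFLICT_START):
--                 mode, ours, theirs = 1, [], []
--             else:
--                 result.append(line)
--         elif line.startswith(CONFLICT_SEP) and not line.startswith(CONFLICT_SEP + " "):
--             mode = 2
--         elif line.startswith(CONFLICT_END):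
--             if strategy == "ours":
--                 result.extend(ours)
--             elif strategy == "theirs":
--                 result.extend(theirs)
--             else:  # merge strategy
--                 result.extend(theirs)
--                 if (
--                     "registerEvoCommands" in "".join(ours)
--                     and "registerEvoCommands" not in "".join(theirs)
--                 ):
--                     result.extend(ours)
--             mode = 0
--         elif mode == 1:
--             ours.append(line)
--         else:
--             theirs.append(line)
--     # mode != 0 here means an unterminated conflict block: its lines are dropped
--
--     resolved = "".join(result)
--     if "command-registry.ts" in filepath:
--         resolved = _ensure_evo_in_registry(resolved)
--     return resolved
-- ===== Notes on version B (the rewrite author's own statement) =====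
-- stated objective: simpler
-- what changed: Replaces A's two-phase structure (parse the conflict markers into a list of block dicts, then iterate the blocks applying the strategy) with a single streaming pass over the lines using a mode flag and two buffers that are flushed per strategy at each conflict end marker; the post-processing is unchanged.
import Mathlib
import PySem

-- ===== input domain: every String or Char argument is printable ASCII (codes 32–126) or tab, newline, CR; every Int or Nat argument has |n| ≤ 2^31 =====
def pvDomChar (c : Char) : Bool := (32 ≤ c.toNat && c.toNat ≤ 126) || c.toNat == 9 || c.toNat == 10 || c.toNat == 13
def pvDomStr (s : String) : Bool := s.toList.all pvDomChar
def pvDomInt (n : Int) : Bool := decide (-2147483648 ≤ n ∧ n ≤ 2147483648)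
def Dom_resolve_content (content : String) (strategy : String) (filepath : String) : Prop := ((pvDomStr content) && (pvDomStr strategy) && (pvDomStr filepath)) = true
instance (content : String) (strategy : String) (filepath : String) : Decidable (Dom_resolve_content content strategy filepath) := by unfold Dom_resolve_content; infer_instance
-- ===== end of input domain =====

-- B replaces A's parse-blocks-then-iterate two-phase structure with a single streaming
-- pass (mode flag + two buffers), same result; post-processing unchanged. Objective: simpler.

-- ===== shared literals and helpers (identical text in both Pythons) =====
def pvStart : List Char := "<<<<<<< ".toList
def pvSep : List Char := "=======".toList
def pvSepSp : List Char := "======= ".toList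
def pvEnd : List Char := ">>>>>>> ".toList
def pvEvo : List Char := "registerEvoCommands".toList

-- content.splitlines(keepends=True); exact on the Dom alphabet (printable ASCII, tab, LF, CR),
-- where the only line breaks are "\n", "\r" and "\r\n".
def pvSplitKeep : List Char → List Char → List (List Char)
  | acc, [] => if acc = [] then [] else [acc.reverse]
  | acc, '\r' :: '\n' :: rest => (acc.reverse ++ ['\r', '\n']) :: pvSplitKeep [] rest
  | acc, '\r' :: rest => (acc.reverse ++ ['\r']) :: pvSplitKeep [] rest
  | acc, '\n' :: rest => (acc.reverse ++ ['\n']) :: pvSplitKeep [] rest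
  | acc, c :: rest => pvSplitKeep (c :: acc) rest

-- the strategy branch of the loop body (textually identical in A and B)
def pvFlush (strategy : String) (o t : List (List Char)) : List (List Char) :=
  if strategy = "ours" then o
  else if strategy = "theirs" then t
  else t ++ (if PySem.Chars.isIn pvEvo o.flatten && !(PySem.Chars.isIn pvEvo t.flatten) then o else [])

-- port of _ensure_evo_in_registry (identical helper in both Pythons)
def pvEnsureEvo (content : List Char) : List Char :=
  let evoImport : List Char := "import { registerEvoCommands } from \"../evo-cli.js\";".toList
  let evoRegister : List Char := "  {\n    id: \"evo\",\n    register: ({ program }) => registerEvoCommands(program),\n  },".toList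
  let content :=
    if !(PySem.Chars.isIn pvEvo content) then
      let lines := pvSplitKeep [] content
      let lastImportIdx : Int :=
        (PySem.List.enumerate lines).foldl
          (fun last p => if PySem.Chars.startswith p.2 "import ".toList then p.1 else last) 0
      let lines := PySem.List.insert lines (lastImportIdx + 1) (evoImport ++ ['\n'])
      lines.flatten
    else content
  let content :=
    if !(PySem.Chars.isIn "\"evo\"".toList content) && !(PySem.Chars.isIn "id: \"evo\"".toList content) then
      PySem.Chars.replace content "  {\n    id: \"setup\"".toList
        (evoRegister ++ "\n  {\n    id: \"setup\"".toList)
    else content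
  content

-- the common tail of resolve_content in both Pythons: join, conditional registry fix-up
def pvPost (filepath : String) (result : List (List Char)) : String :=
  let resolved := result.flatten
  let resolved :=
    if PySem.Chars.isIn "command-registry.ts".toList filepath.toList then pvEnsureEvo resolved
    else resolved
  String.ofList resolved

-- ===== PORT A =====
inductive PvBlock where
  | plain : List Char → PvBlock
  | conflict : List (List Char) → List (List Char) → PvBlock

-- the inner while loop of parse_conflict_blocks: returns (ours, theirs, remaining lines)
-- on CONFLICT_END, none if the lines run out first (unterminated block dropped)
def pvParseInner : List (List Char) → List (List Char) → List (List Char) → Bool →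
    Option (List (List Char) × List (List Char) × List (List Char))
  | [], _, _, _ => none
  | l :: ls, o, t, inOurs =>
    if PySem.Chars.startswith l pvSep && !(PySem.Chars.startswith l pvSepSp) then
      pvParseInner ls o t false
    else if PySem.Chars.startswith l pvEnd then some (o, t, ls)
    else if inOurs then pvParseInner ls (o ++ [l]) t inOurs
    else pvParseInner ls o (t ++ [l]) inOurs

theorem pvParseInner_lt : ∀ (ls o t : List (List Char)) (b : Bool) o' t' r,
    pvParseInner ls o t b = some (o', t', r) → r.length < ls.length := by
  intro ls
  induction ls with
  | nil => intro o t b o' t' r h; simp [pvParseInner] at h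
  | cons l ls ih =>
    intro o t b o' t' r h
    simp only [pvParseInner] at h
    split_ifs at h with h1 h2 h3
    · exact Nat.lt_succ_of_lt (ih _ _ _ _ _ _ h)
    · simp only [Option.some.injEq, Prod.mk.injEq] at h
      simp [← h.2.2]
    · exact Nat.lt_succ_of_lt (ih _ _ _ _ _ _ h)
    · exact Nat.lt_succ_of_lt (ih _ _ _ _ _ _ h)

def pvParseBlocks : List (List Char) → List PvBlock
  | [] => []
  | l :: ls =>
    if PySem.Chars.startswith l pvStart then
      match h : pvParseInner ls [] [] true with
      | none => []
      | some (o, t, r) => PvBlock.conflict o t :: pvParseBlocks r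
    else PvBlock.plain l :: pvParseBlocks ls
termination_by ls => ls.length
decreasing_by
  · exact Nat.lt_succ_of_lt (pvParseInner_lt _ _ _ _ _ _ _ h)
  · simp

-- the second loop of A's resolve_content, over the block list
def pvRender (strategy : String) (acc : List (List Char)) (blocks : List PvBlock) : List (List Char) :=
  blocks.foldl
    (fun acc b =>
      match b with
      | PvBlock.plain l => acc ++ [l]
      | PvBlock.conflict o t => acc ++ pvFlush strategy o t)
    acc

def resolve_content (content : String) (strategy : String) (filepath : String) : String :=
  pvPost filepath (pvRender strategy [] (pvParseBlocks (pvSplitKeep [] content.toList)))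

-- ===== PORT B =====
inductive PvMode where
  | plain : PvMode
  | inOurs : PvMode
  | inTheirs : PvMode

-- one step of B's streaming loop: state = (result, mode, ours, theirs)
def pvStep (strategy : String)
    (st : List (List Char) × PvMode × List (List Char) × List (List Char)) (l : List Char) :
    List (List Char) × PvMode × List (List Char) × List (List Char) :=
  match st with
  | (res, PvMode.plain, o, t) =>
    if PySem.Chars.startswith l pvStart then (res, PvMode.inOurs, [], [])
    else (res ++ [l], PvMode.plain, o, t)
  | (res, PvMode.inOurs, o, t) =>
    if PySem.Chars.startswith l pvSep && !(PySem.Chars.startswith l pvSepSp) then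
      (res, PvMode.inTheirs, o, t)
    else if PySem.Chars.startswith l pvEnd then (res ++ pvFlush strategy o t, PvMode.plain, o, t)
    else (res, PvMode.inOurs, o ++ [l], t)
  | (res, PvMode.inTheirs, o, t) =>
    if PySem.Chars.startswith l pvSep && !(PySem.Chars.startswith l pvSepSp) then
      (res, PvMode.inTheirs, o, t)
    else if PySem.Chars.startswith l pvEnd then (res ++ pvFlush strategy o t, PvMode.plain, o, t)
    else (res, PvMode.inTheirs, o, t ++ [l])

def resolve_content_alt (content : String) (strategy : String) (filepath : String) : String :=
  pvPost filepath
    ((pvSplitKeep [] content.toList).foldl (pvStep strategy) ([], PvMode.plain, [], [])).1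

-- ===== PRECONDITION & SPEC =====
def Spec_resolve_content (content : String) (strategy : String) (filepath : String) (out : String) : Prop := out = resolve_content_alt content strategy filepath
instance (content : String) (strategy : String) (filepath : String) (out : String) : Decidable (Spec_resolve_content content strategy filepath out) := by unfold Spec_resolve_content; infer_instance

-- ===== CLAIM (what is proved, stated in full; the proofs are below) =====
def Claim_equal_resolve_content : Prop := ∀ (content : String) (strategy : String) (filepath : String), Dom_resolve_content content strategy filepath → Spec_resolve_content content strategy filepath (resolve_content content strategy filepath)

-- ===== LEMMAS AND PROOFS =====

-- the streaming fold from plain mode computes exactly A's render-of-parsed-blocks, and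
-- from a conflict mode it computes the continuation determined by pvParseInner
theorem pvMain (strategy : String) : ∀ (n : Nat) (lines : List (List Char)), lines.length ≤ n →
    (∀ res o t, (lines.foldl (pvStep strategy) (res, PvMode.plain, o, t)).1
        = pvRender strategy res (pvParseBlocks lines))
    ∧ (∀ res o t,
        (lines.foldl (pvStep strategy) (res, PvMode.inOurs, o, t)).1
        = match pvParseInner lines o t true with
          | none => res
          | some (o', t', r) => pvRender strategy (res ++ pvFlush strategy o' t') (pvParseBlocks r))
    ∧ (∀ res o t,
        (lines.foldl (pvStep strategy) (res, PvMode.inTheirs, o, t)).1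
        = match pvParseInner lines o t false with
          | none => res
          | some (o', t', r) => pvRender strategy (res ++ pvFlush strategy o' t') (pvParseBlocks r)) := by
  intro n
  induction n with
  | zero =>
    intro lines hlen
    have : lines = [] := List.eq_nil_of_length_eq_zero (Nat.le_zero.mp hlen)
    subst this
    refine ⟨fun res o t => by simp [pvParseBlocks, pvRender],
            fun res o t => by simp [pvParseInner],
            fun res o t => by simp [pvParseInner]⟩
  | succ n ih =>
    intro lines hlen
    cases lines with
    | nil =>
      refine ⟨fun res o t => by simp [pvParseBlocks, pvRender],
              fun res o t => by simp [pvParseInner],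
              fun res o t => by simp [pvParseInner]⟩
    | cons l ls =>
      have hls : ls.length ≤ n := by
        simpa using Nat.lt_succ_iff.mp (Nat.lt_of_lt_of_le (by simp) hlen)
      refine ⟨?_, ?_, ?_⟩
      · intro res o t
        rw [List.foldl_cons]
        by_cases hs : PySem.Chars.startswith l pvStart = true
        · have hstep : pvStep strategy (res, PvMode.plain, o, t) l = (res, PvMode.inOurs, [], []) := by
            simp [pvStep, hs]
          rw [hstep, (ih ls hls).2.1 res [] []]
          rw [pvParseBlocks]
          simp only [hs, if_pos]
          cases hinner : pvParseInner ls [] [] true with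
          | none => simp [pvRender]
          | some v =>
            obtain ⟨o', t', r⟩ := v
            simp only [pvRender, List.foldl_cons]
        · have hstep : pvStep strategy (res, PvMode.plain, o, t) l = (res ++ [l], PvMode.plain, o, t) := by
            simp [pvStep, hs]
          rw [hstep, (ih ls hls).1 (res ++ [l]) o t]
          rw [pvParseBlocks]
          simp only [hs]
          simp [pvRender]
      · intro res o t
        rw [List.foldl_cons]
        by_cases hsep : (PySem.Chars.startswith l pvSep && !(PySem.Chars.startswith l pvSepSp)) = true
        · have hstep : pvStep strategy (res, PvMode.inOurs, o, t) l = (res, PvMode.inTheirs, o, t) := by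
            simp only [pvStep, hsep]; rfl
          rw [hstep, (ih ls hls).2.2 res o t]
          simp only [pvParseInner, hsep, if_pos]
        · by_cases hend : PySem.Chars.startswith l pvEnd = true
          · have hstep : pvStep strategy (res, PvMode.inOurs, o, t) l
                = (res ++ pvFlush strategy o t, PvMode.plain, o, t) := by
              simp [pvStep, hsep, hend]
            rw [hstep, (ih ls hls).1 (res ++ pvFlush strategy o t) o t]
            simp only [pvParseInner, hsep, hend]
            simp
          · have hstep : pvStep strategy (res, PvMode.inOurs, o, t) l
                = (res, PvMode.inOurs, o ++ [l], t) := by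
              simp [pvStep, hsep, hend]
            rw [hstep, (ih ls hls).2.1 res (o ++ [l]) t]
            simp only [pvParseInner, hsep, hend]
            simp
      · intro res o t
        rw [List.foldl_cons]
        by_cases hsep : (PySem.Chars.startswith l pvSep && !(PySem.Chars.startswith l pvSepSp)) = true
        · have hstep : pvStep strategy (res, PvMode.inTheirs, o, t) l = (res, PvMode.inTheirs, o, t) := by
            simp only [pvStep, hsep]; rfl
          rw [hstep, (ih ls hls).2.2 res o t]
          simp only [pvParseInner, hsep, if_pos]
        · by_cases hend : PySem.Chars.startswith l pvEnd = true
          · have hstep : pvStep strategy (res, PvMode.inTheirs, o, t) l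
                = (res ++ pvFlush strategy o t, PvMode.plain, o, t) := by
              simp [pvStep, hsep, hend]
            rw [hstep, (ih ls hls).1 (res ++ pvFlush strategy o t) o t]
            simp only [pvParseInner, hsep, hend]
            simp
          · have hstep : pvStep strategy (res, PvMode.inTheirs, o, t) l
                = (res, PvMode.inTheirs, o, t ++ [l]) := by
              simp [pvStep, hsep, hend]
            rw [hstep, (ih ls hls).2.2 res o (t ++ [l])]
            simp only [pvParseInner, hsep, hend]
            simp

-- ===== VERDICT (by name: the statement is the Claim_ definition above) =====
theorem resolve_content_spec : Claim_equal_resolve_content := by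
  intro content strategy filepath _
  unfold Spec_resolve_content resolve_content resolve_content_alt
  rw [(pvMain strategy (pvSplitKeep [] content.toList).length
      (pvSplitKeep [] content.toList) le_rfl).1 [] [] []]
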